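-- pv_equiv track=rewrite | github.com/grapergrape/cypher-competition | reconstruction.py | symbol_extractor
-- ===== SOURCE A (Python) =====
-- def symbol_extractor(stringlist: list):
--     """
--     This function extracts the symbols resembling vectors from the input stringlist and returns them as a list
--
--     Input: stringlist
--     Output: list of symbols like ['->', '<-', '-']
--     """
--     symbols = []
--     if stringlist == ['Syntax error']:
--         return ['Syntax error']
--     for string in stringlist:
--         i = 0
--         while i < len(string):
--             if string[i:i+2] in ('->', '<-'):
--                 symbols.append(string[i:i+2])
--                 i += 2
--             elif string[i] == '-':
--                 symbols.append(string[i])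
--                 i += 1
--             else:
--                 i += 1
--     return symbols
-- ===== SOURCE B (Python) =====
-- def symbol_extractor(stringlist: list):
--     """
--     This function extracts the symbols resembling vectors from the input stringlist and returns them as a list
--
--     Input: stringlist
--     Output: list of symbols like ['->', '<-', '-']
--     """
--     if stringlist == ['Syntax error']:
--         return ['Syntax error']
--     symbols = []
--     for string in stringlist:
--         cs = list(reversed(string))  # stack: pop() yields the characters left-to-right
--         while cs:
--             a = cs.pop()
--             if a == '-' and cs and cs[-1] == '>':
--                 cs.pop()
--                 symbols.append('->')
--             elif a == '<' and cs and cs[-1] == '-':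
--                 cs.pop()
--                 symbols.append('<-')
--             elif a == '-':
--                 symbols.append('-')
--     return symbols
-- ===== Notes on version B (the rewrite author's own statement) =====
-- stated objective: alternative
-- what changed: Replaced the index-arithmetic while-loop with slice/lookahead tests by a stack-based consumer: each string is reversed onto a stack and characters are popped, with two-char tokens recognised by peeking at the stack top, so no index bookkeeping or slicing remains.
import Mathlib
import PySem

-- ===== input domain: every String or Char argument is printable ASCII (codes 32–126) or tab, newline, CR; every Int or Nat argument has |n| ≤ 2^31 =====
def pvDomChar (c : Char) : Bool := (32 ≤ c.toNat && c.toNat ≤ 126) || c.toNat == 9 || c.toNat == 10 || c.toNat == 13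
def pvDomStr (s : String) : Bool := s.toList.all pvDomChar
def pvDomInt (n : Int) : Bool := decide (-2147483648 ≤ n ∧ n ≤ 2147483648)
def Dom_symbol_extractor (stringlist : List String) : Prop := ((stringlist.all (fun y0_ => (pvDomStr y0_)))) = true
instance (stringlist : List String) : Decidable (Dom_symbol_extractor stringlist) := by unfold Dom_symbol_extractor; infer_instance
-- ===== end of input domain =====

-- B replaces A's index-arithmetic while-loop (slices, i += 1/2) by a stack-based consumer
-- popping characters left-to-right and peeking at the stack top for two-char tokens. (objective: alternative)

-- ===== PORT A =====
-- inner while-loop of A: i is the index; string[i:i+2] with nonnegative bounds is (drop i).take 2 (exact),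
-- string[i] with 0 <= i < len is the head element (exact, in range here).
def symLoopA (cs : List Char) (i : Nat) (symbols : List String) : List String :=
  if h : i < cs.length then
    if (cs.drop i).take 2 = ['-', '>'] ∨ (cs.drop i).take 2 = ['<', '-'] then
      symLoopA cs (i + 2) (symbols ++ [String.ofList ((cs.drop i).take 2)])
    else if cs[i] = '-' then
      symLoopA cs (i + 1) (symbols ++ ["-"])
    else
      symLoopA cs (i + 1) symbols
  else symbols
termination_by cs.length - i

def symbol_extractor (stringlist : List String) : List String :=
  if stringlist = ["Syntax error"] then ["Syntax error"]
  else stringlist.foldl (fun symbols string => symLoopA string.toList 0 symbols) []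

-- ===== PORT B =====
-- B's while-loop over the stack cs = list(reversed(string)): popping from the end of the reversed list
-- consumes the characters of `string` front to back, so the port recurses on string.toList directly;
-- `cs and cs[-1] == c` is the head?-test on what remains.
def scanB (cs : List Char) (symbols : List String) : List String :=
  match cs with
  | [] => symbols
  | a :: rest =>
    if a = '-' ∧ rest.head? = some '>' then scanB rest.tail (symbols ++ ["->"])
    else if a = '<' ∧ rest.head? = some '-' then scanB rest.tail (symbols ++ ["<-"])
    else if a = '-' then scanB rest (symbols ++ ["-"])
    else scanB rest symbols
termination_by cs.length

def symbol_extractor_alt (stringlist : List String) : List String :=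
  if stringlist = ["Syntax error"] then ["Syntax error"]
  else stringlist.foldl (fun symbols string => scanB string.toList symbols) []

-- ===== PRECONDITION & SPEC =====
def Spec_symbol_extractor (stringlist : List String) (out : List String) : Prop := out = symbol_extractor_alt stringlist
instance (stringlist : List String) (out : List String) : Decidable (Spec_symbol_extractor stringlist out) := by unfold Spec_symbol_extractor; infer_instance

-- ===== CLAIM (what is proved, stated in full; the proofs are below) =====
def Claim_equal_symbol_extractor : Prop := ∀ (stringlist : List String), Dom_symbol_extractor stringlist → Spec_symbol_extractor stringlist (symbol_extractor stringlist)

-- ===== LEMMAS AND PROOFS =====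

theorem symLoopA_eq_scanB (cs : List Char) (i : Nat) (symbols : List String) :
    symLoopA cs i symbols = scanB (cs.drop i) symbols := by
  rw [symLoopA]
  split
  · rename_i h
    have hd : cs.drop i ≠ [] := by
      intro he
      have hlen := cs.length_drop (i := i)
      rw [he] at hlen; simp at hlen; omega
    obtain ⟨a, r, hr⟩ := List.exists_cons_of_ne_nil hd
    have h1 : cs.drop (i + 1) = r := by
      rw [← List.tail_drop, hr]; rfl
    have h2 : cs.drop (i + 2) = r.tail := by
      show cs.drop (i + 1 + 1) = r.tail
      rw [← List.tail_drop, h1]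
    have ha : cs[i] = a := by
      have h0 : (cs.drop i).head hd = a := by simp [hr]
      rw [List.head_drop] at h0
      simpa using h0
    have htwo : (cs.drop i).take 2 = a :: r.take 1 := by rw [hr]; rfl
    rw [htwo, ha, hr]
    by_cases hc1 : a = '-' ∧ r.head? = some '>'
    · have ht : a :: r.take 1 = ['-', '>'] := by
        obtain ⟨r0, r', hr'⟩ := List.exists_cons_of_ne_nil (l := r)
          (by intro he; rw [he] at hc1; simp at hc1)
        rw [hr'] at hc1 ⊢; simp at hc1; simp [hc1.1, hc1.2, List.take]
      rw [ht, if_pos (Or.inl rfl), scanB, if_pos hc1,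
          symLoopA_eq_scanB cs (i + 2), h2]
    · by_cases hc2 : a = '<' ∧ r.head? = some '-'
      · have ht : a :: r.take 1 = ['<', '-'] := by
          obtain ⟨r0, r', hr'⟩ := List.exists_cons_of_ne_nil (l := r)
            (by intro he; rw [he] at hc2; simp at hc2)
          rw [hr'] at hc2 ⊢; simp at hc2; simp [hc2.1, hc2.2, List.take]
        rw [ht, if_pos (Or.inr rfl), scanB, if_neg hc1, if_pos hc2,
            symLoopA_eq_scanB cs (i + 2), h2]
      · have hne : ¬ (a :: r.take 1 = ['-', '>'] ∨ a :: r.take 1 = ['<', '-']) := by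
          rintro (he | he)
          · cases r with
            | nil => simp [List.take] at he
            | cons r0 r' =>
              simp [List.take] at he
              exact hc1 ⟨he.1, by simp [he.2]⟩
          · cases r with
            | nil => simp [List.take] at he
            | cons r0 r' =>
              simp [List.take] at he
              exact hc2 ⟨he.1, by simp [he.2]⟩
        rw [if_neg hne]
        by_cases hm : a = '-'
        · rw [if_pos hm, scanB, if_neg hc1, if_neg hc2, if_pos hm,
              symLoopA_eq_scanB cs (i + 1), h1]
        · rw [if_neg hm, scanB, if_neg hc1, if_neg hc2, if_neg hm,
              symLoopA_eq_scanB cs (i + 1), h1]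
  · rename_i h
    rw [List.drop_of_length_le (by omega), scanB]
termination_by cs.length - i

-- ===== VERDICT (by name: the statement is the Claim_ definition above) =====
theorem symbol_extractor_spec : Claim_equal_symbol_extractor := by
  intro stringlist _
  unfold Spec_symbol_extractor symbol_extractor symbol_extractor_alt
  have hf : (fun (symbols : List String) (string : String) => symLoopA string.toList 0 symbols)
      = fun symbols string => scanB string.toList symbols := by
    funext symbols string
    exact symLoopA_eq_scanB string.toList 0 symbols
  rw [hf]
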